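-- pv_equiv track=rewrite | github.com/Golichen/Genshin_impact_lab2_variant7 | hashmap_separate_chaining_dict.py | remove_from_bucket
-- ===== SOURCE A (Python) =====
-- def remove_from_bucket(bucket, key):
--     if not bucket:
--         return ()
--     current_key, current_val = bucket[0]
--     if current_key == key:
--         return bucket[1:]
--     else:
--         return (bucket[0],) + remove_from_bucket(bucket[1:], key)
-- ===== SOURCE B (Python) =====
-- def remove_from_bucket(bucket, key):
--     for i, (k, _) in enumerate(bucket):
--         if k == key:
--             return bucket[:i] + bucket[i + 1:]
--     return bucket
-- ===== Notes on version B (the rewrite author's own statement) =====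
-- stated objective: simpler
-- what changed: Replaced A's head/rest recursion that rebuilds the tuple pair by pair with an iterative enumerate scan for the first matching index followed by a single slice-concat.
import Mathlib
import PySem

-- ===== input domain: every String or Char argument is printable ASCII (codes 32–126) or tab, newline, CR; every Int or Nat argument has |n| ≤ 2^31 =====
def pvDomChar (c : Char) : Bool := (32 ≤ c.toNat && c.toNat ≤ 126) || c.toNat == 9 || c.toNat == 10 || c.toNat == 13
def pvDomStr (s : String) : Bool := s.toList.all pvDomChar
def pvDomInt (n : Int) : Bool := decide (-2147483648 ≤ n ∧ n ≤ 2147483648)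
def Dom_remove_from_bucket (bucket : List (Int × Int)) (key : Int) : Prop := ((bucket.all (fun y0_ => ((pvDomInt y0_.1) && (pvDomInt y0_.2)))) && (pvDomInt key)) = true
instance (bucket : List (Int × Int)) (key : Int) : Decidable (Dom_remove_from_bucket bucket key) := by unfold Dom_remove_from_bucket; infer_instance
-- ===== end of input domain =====

-- B replaces A's head/rest recursion (rebuilding the tuple pair by pair) with an
-- iterative first-index scan plus one slice-concat; objective: simpler.


-- ===== PORT A =====
-- A: if empty return (); unpack head; if head key matches return rest; else cons head onto recursion.
def remove_from_bucket (bucket : List (Int × Int)) (key : Int) : List (Int × Int) :=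
  match bucket with
  | [] => []
  | h :: t => if h.1 = key then t else h :: remove_from_bucket t key

-- ===== PORT B =====
-- B's enumerate loop: scan for the first index whose key matches, carrying the running index.
def rfbFindIdx (bucket : List (Int × Int)) (key : Int) (i : Nat) : Option Nat :=
  match bucket with
  | [] => none
  | h :: t => if h.1 = key then some i else rfbFindIdx t key (i + 1)

def remove_from_bucket_alt (bucket : List (Int × Int)) (key : Int) : List (Int × Int) :=
  match rfbFindIdx bucket key 0 with
  | none => bucket
  | some i => bucket.take i ++ bucket.drop (i + 1)

-- ===== PRECONDITION & SPEC =====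
def Spec_remove_from_bucket (bucket : List (Int × Int)) (key : Int) (out : List (Int × Int)) : Prop := out = remove_from_bucket_alt bucket key
instance (bucket : List (Int × Int)) (key : Int) (out : List (Int × Int)) : Decidable (Spec_remove_from_bucket bucket key out) := by unfold Spec_remove_from_bucket; infer_instance

-- ===== CLAIM (what is proved, stated in full; the proofs are below) =====
def Claim_equal_remove_from_bucket : Prop := ∀ (bucket : List (Int × Int)) (key : Int), Dom_remove_from_bucket bucket key → Spec_remove_from_bucket bucket key (remove_from_bucket bucket key)

-- ===== LEMMAS AND PROOFS =====
theorem rfbFindIdx_shift (bucket : List (Int × Int)) (key : Int) (i : Nat) :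
    rfbFindIdx bucket key (i + 1) = (rfbFindIdx bucket key i).map (· + 1) := by
  induction bucket generalizing i with
  | nil => rfl
  | cons h t ih =>
    simp only [rfbFindIdx]
    split
    · rfl
    · exact ih (i + 1)

theorem remove_from_bucket_eq_alt (bucket : List (Int × Int)) (key : Int) :
    remove_from_bucket bucket key = remove_from_bucket_alt bucket key := by
  induction bucket with
  | nil => rfl
  | cons h t ih =>
    simp only [remove_from_bucket, remove_from_bucket_alt, rfbFindIdx]
    split
    · simp
    · rw [rfbFindIdx_shift]
      rw [ih]
      simp only [remove_from_bucket_alt]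
      cases hf : rfbFindIdx t key 0 with
      | none => simp
      | some i => simp [List.take_succ_cons, List.drop_succ_cons]

-- ===== VERDICT (by name: the statement is the Claim_ definition above) =====
theorem remove_from_bucket_spec : Claim_equal_remove_from_bucket := by
  intro bucket key _
  exact remove_from_bucket_eq_alt bucket key
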